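-- pv_equiv track=rewrite | github.com/LouisVonRichter/Advent-of-Code | 2023/Day-09/Day-09.py | create_diff_sequences
-- ===== SOURCE A (Python) =====
-- def create_diff_sequences(sequence):
--     full_sequence = [sequence[:]]
--     while True:
--         current_differences = [
--             current - previous
--             for previous, current
--             in zip(sequence, sequence[1:])
--         ]
--
--         full_sequence.append(current_differences)
--
--         sequence = current_differences
--         if all(difference == 0 for difference in current_differences):
--             break
--
--     return full_sequence
-- ===== SOURCE B (Python) =====
-- def create_diff_sequences(sequence):
--     diffs = [c - p for p, c in zip(sequence, sequence[1:])]
--     if all(d == 0 for d in diffs):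
--         return [sequence[:], diffs]
--     return [sequence[:]] + create_diff_sequences(diffs)
-- ===== Notes on version B (the rewrite author's own statement) =====
-- stated objective: simpler
-- what changed: Replaced the explicit while-True loop with an accumulator list by direct recursion on the freshly computed difference row, returning the current row consed onto the recursive result.
import Mathlib
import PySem

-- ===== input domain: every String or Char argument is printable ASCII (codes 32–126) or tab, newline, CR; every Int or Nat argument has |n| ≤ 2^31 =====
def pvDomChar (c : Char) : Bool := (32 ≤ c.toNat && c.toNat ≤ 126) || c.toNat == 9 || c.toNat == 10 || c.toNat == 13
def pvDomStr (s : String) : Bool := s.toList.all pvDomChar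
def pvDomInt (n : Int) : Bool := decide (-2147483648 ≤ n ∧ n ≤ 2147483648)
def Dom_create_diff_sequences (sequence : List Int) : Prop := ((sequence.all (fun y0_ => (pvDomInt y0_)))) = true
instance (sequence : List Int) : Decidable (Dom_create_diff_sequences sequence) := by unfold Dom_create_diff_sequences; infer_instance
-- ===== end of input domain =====

-- B replaces A's while-loop with an accumulator by direct recursion on the difference row (objective: simpler).


-- ===== PORT A =====
-- [current - previous for previous, current in zip(sequence, sequence[1:])]
def pvDiffsA (sequence : List Int) : List Int :=
  (sequence.zip (sequence.drop 1)).map (fun pc => pc.2 - pc.1)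

-- nonempty diff row is shorter than its source (used only for termination)
theorem pvDiffsA_length_lt (s : List Int) (h : pvDiffsA s ≠ []) :
    (pvDiffsA s).length < s.length := by
  cases s with
  | nil => simp [pvDiffsA] at h
  | cons a t =>
      simp only [pvDiffsA, List.length_map, List.length_zip, List.length_cons,
        List.length_drop]
      omega

-- a list failing the all-zero test is nonempty (used only for termination)
theorem pvNeNil_of_not_all {x : List Int} (h : ¬(x.all fun d => d == 0) = true) :
    x ≠ [] := by
  rintro rfl; simp at h

-- the while-True loop of A, with full_sequence as accumulator
def pvLoopA (full : List (List Int)) (sequence : List Int) : List (List Int) :=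
  let current_differences := pvDiffsA sequence
  let full' := full ++ [current_differences]
  if current_differences.all (fun d => d == 0) then full'
  else pvLoopA full' current_differences
termination_by sequence.length
decreasing_by
  rename_i h
  exact pvDiffsA_length_lt sequence (pvNeNil_of_not_all h)

def create_diff_sequences (sequence : List Int) : List (List Int) :=
  pvLoopA [sequence] sequence

-- ===== PORT B =====
def create_diff_sequences_alt (sequence : List Int) : List (List Int) :=
  let diffs := (sequence.zip (sequence.drop 1)).map (fun pc => pc.2 - pc.1)
  if diffs.all (fun d => d == 0) then [sequence, diffs]
  else sequence :: create_diff_sequences_alt diffs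
termination_by sequence.length
decreasing_by
  rename_i h
  exact pvDiffsA_length_lt sequence (pvNeNil_of_not_all h)

-- ===== PRECONDITION & SPEC =====
def Spec_create_diff_sequences (sequence : List Int) (out : List (List Int)) : Prop := out = create_diff_sequences_alt sequence
instance (sequence : List Int) (out : List (List Int)) : Decidable (Spec_create_diff_sequences sequence out) := by unfold Spec_create_diff_sequences; infer_instance

-- ===== CLAIM (what is proved, stated in full; the proofs are below) =====
def Claim_equal_create_diff_sequences : Prop := ∀ (sequence : List Int), Dom_create_diff_sequences sequence → Spec_create_diff_sequences sequence (create_diff_sequences sequence)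

-- ===== LEMMAS AND PROOFS =====

-- B always returns its argument as the first row
theorem alt_head (s : List Int) :
    create_diff_sequences_alt s = s :: (create_diff_sequences_alt s).tail := by
  rw [create_diff_sequences_alt]
  split <;> simp

-- A's loop appends exactly the tail rows of B's result
theorem loopA_eq (s : List Int) : ∀ full,
    pvLoopA full s = full ++ (create_diff_sequences_alt s).tail := by
  induction s using create_diff_sequences_alt.induct with
  | case1 s d hall =>
      intro full
      rw [pvLoopA, create_diff_sequences_alt]
      simp only [pvDiffsA]
      rw [if_pos hall, if_pos hall]
      simp
  | case2 s d hall ih =>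
      intro full
      rw [pvLoopA, create_diff_sequences_alt]
      simp only [pvDiffsA]
      rw [if_neg hall, if_neg hall, ih]
      rw [alt_head d]
      simp
      rw [← List.drop_one]

-- ===== VERDICT (by name: the statement is the Claim_ definition above) =====
theorem create_diff_sequences_spec : Claim_equal_create_diff_sequences := by
  intro s _
  unfold Spec_create_diff_sequences create_diff_sequences
  rw [loopA_eq s [s], alt_head s]
  simp
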